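-- pv_equiv track=rewrite | github.com/ZhengyangXu/Classified | 8.Data_Structure/8.7_401_Kth_Smallest_Number_in_Sorted_Matrix.py | count
-- ===== SOURCE A (Python) =====
-- def count(matrix, target):
--     m = len(matrix)
--     n = len(matrix[0])
--     i = m - 1
--     j = 0
--     count = 0
--     while (i >= 0 and j < n):
--         if matrix[i][j] <= target:
--             count += (i + 1)
--             j += 1
--         else:
--             i -= 1
--     return count
-- ===== SOURCE B (Python) =====
-- def count(matrix, target):
--     m, n = len(matrix), len(matrix[0])
--     # per column j, a jump table: tab[i] = highest row index <= i whose entry in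
--     # column j is <= target, or -1 if there is none
--     tables = []
--     for j in range(n):
--         tab, best = [], -1
--         for i in range(m):
--             if matrix[i][j] <= target:
--                 best = i
--             tab.append(best)
--         tables.append(tab)
--     total, i = 0, m - 1
--     for tab in tables:
--         if i < 0:
--             break
--         i = tab[i]
--         total += i + 1
--     return total
-- ===== Notes on version B (the rewrite author's own statement) =====
-- stated objective: alternative
-- what changed: Replaces A's on-line two-pointer staircase walk by a two-stage tabulation: first a column-major pass precomputes, for every column, a jump table tab[i] = highest row <= i whose entry is <= target; then a single fold over the columns follows pointer jumps i = tab[i] through these tables, accumulating i+1 per column.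
-- outside the precondition, e.g. on count([[1, 2], [3]], 0): A returns 0, B raises IndexError; on count([], 0): A raises IndexError, B raises IndexError
import Mathlib
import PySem

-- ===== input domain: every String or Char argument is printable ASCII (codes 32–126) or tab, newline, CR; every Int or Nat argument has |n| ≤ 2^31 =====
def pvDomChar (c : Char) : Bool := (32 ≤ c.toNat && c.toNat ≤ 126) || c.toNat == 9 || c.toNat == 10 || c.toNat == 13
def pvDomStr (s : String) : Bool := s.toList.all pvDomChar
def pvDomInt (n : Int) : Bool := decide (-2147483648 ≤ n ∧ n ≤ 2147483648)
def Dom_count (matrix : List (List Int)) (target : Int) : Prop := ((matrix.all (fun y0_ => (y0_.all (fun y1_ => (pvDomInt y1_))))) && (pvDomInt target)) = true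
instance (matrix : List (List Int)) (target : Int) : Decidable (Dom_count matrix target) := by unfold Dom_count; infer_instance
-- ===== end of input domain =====

-- B replaces A's on-line two-pointer staircase walk by a two-stage tabulation: per-column jump
-- tables are precomputed, then one fold over the columns follows pointer jumps (alternative).

-- ===== PORT A =====
-- the while-loop of A: state (i, j, count); matrix[i][j] accessed with pyGet? (in range under Pre_count)
def countGo (matrix : List (List Int)) (target n : Int) (i j c : Int) : Int :=
  if _h : 0 ≤ i ∧ j < n then
    if ((PySem.List.pyGet? ((PySem.List.pyGet? matrix i).getD []) j)).getD 0 ≤ target then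
      countGo matrix target n i (j + 1) (c + (i + 1))
    else
      countGo matrix target n (i - 1) j c
  else c
termination_by (i + 1).toNat + (n - j).toNat
decreasing_by all_goals omega

def count (matrix : List (List Int)) (target : Int) : Int :=
  let m : Int := matrix.length
  let n : Int := ((PySem.List.pyGet? matrix 0).getD []).length   -- len(matrix[0]): IndexError on [] (excluded by Pre_count)
  countGo matrix target n (m - 1) 0 0

-- ===== PORT B =====
-- inner loop of the first stage: for column j, tab/best over rows 0..m-1
-- (matrix[i][j] with 0 ≤ i < m and j < row length under Pre_count: the getD defaults are never used)
def colTab (M : List (List Int)) (target : Int) (j m : ℕ) : List Int :=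
  ((List.range m).foldl (fun (s : List Int × Int) i =>
      let best := if (M.getD i []).getD j 0 ≤ target then (i : Int) else s.2
      (s.1 ++ [best], best)) ([], -1)).1

-- second stage: for tab in tables: if i < 0: break; i = tab[i]; total += i + 1
def chainGo : List (List Int) → Int → Int → Int
  | [], _, total => total
  | tab :: rest, i, total =>
    if i < 0 then total
    else
      let i' := (PySem.List.pyGet? tab i).getD 0
      chainGo rest i' (total + i' + 1)

def count_alt (matrix : List (List Int)) (target : Int) : Int :=
  let m : ℕ := matrix.length
  let n : ℕ := ((PySem.List.pyGet? matrix 0).getD []).length   -- len(matrix[0]): IndexError on [] (excluded by Pre_count)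
  let tables := (List.range n).map (fun j => colTab matrix target j m)
  chainGo tables ((m : Int) - 1) 0

-- ===== PRECONDITION & SPEC =====
-- Pre_count excludes the empty matrix (len(matrix[0]) raises IndexError in both programs) and
-- matrices with some row shorter than the first row, on which B always raises IndexError while
-- A raises whenever its walk reaches a missing cell.
def Pre_count (matrix : List (List Int)) (target : Int) : Prop :=
  matrix ≠ [] ∧ ∀ r ∈ matrix, matrix.headI.length ≤ r.length
instance (matrix : List (List Int)) (target : Int) : Decidable (Pre_count matrix target) := by
  unfold Pre_count; infer_instance

def pvWitness_count : List (List Int) × Int := ([[1, 3], [2, 4]], 3)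

def Spec_count (matrix : List (List Int)) (target : Int) (out : Int) : Prop := out = count_alt matrix target
instance (matrix : List (List Int)) (target : Int) (out : Int) : Decidable (Spec_count matrix target out) := by unfold Spec_count; infer_instance

-- ===== CLAIM (what is proved, stated in full; the proofs are below) =====
def Claim_equal_count : Prop := ∀ (matrix : List (List Int)) (target : Int), Dom_count matrix target → Pre_count matrix target → Spec_count matrix target (count matrix target)

-- ===== LEMMAS AND PROOFS =====

-- closed form of the running 'best' of column j after row i: highest row ≤ i with entry ≤ target
def bestF (M : List (List Int)) (target : Int) (j : ℕ) : ℕ → Int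
  | 0 => if (M.getD 0 []).getD j 0 ≤ target then 0 else -1
  | i + 1 => if (M.getD (i + 1) []).getD j 0 ≤ target then ((i : Int) + 1) else bestF M target j i

lemma bestF_ge (M : List (List Int)) (target : Int) (j : ℕ) :
    ∀ i : ℕ, -1 ≤ bestF M target j i := by
  intro i
  induction i with
  | zero => unfold bestF; split <;> omega
  | succ i ih => unfold bestF; split <;> omega

lemma bestF_le (M : List (List Int)) (target : Int) (j : ℕ) :
    ∀ i : ℕ, bestF M target j i ≤ i := by
  intro i
  induction i with
  | zero => unfold bestF; split <;> omega
  | succ i ih => unfold bestF; split <;> push_cast <;> omega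

-- the first-stage fold: the produced list is the table of bestF, the state the last best
lemma colTab_fold (M : List (List Int)) (target : Int) (j : ℕ) :
    ∀ m : ℕ, ((List.range m).foldl (fun (s : List Int × Int) i =>
        let best := if (M.getD i []).getD j 0 ≤ target then (i : Int) else s.2
        (s.1 ++ [best], best)) ([], -1))
      = ((List.range m).map (fun i => bestF M target j i),
         if m = 0 then (-1 : Int) else bestF M target j (m - 1)) := by
  intro m
  induction m with
  | zero => simp
  | succ m ih =>
    rw [List.range_succ, List.foldl_append, ih, List.map_append]
    cases m with
    | zero => simp [bestF]
    | succ k =>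
      simp only [List.foldl_cons, List.foldl_nil]
      simp [bestF]

lemma colTab_get (M : List (List Int)) (target : Int) (j m : ℕ) (i : Int)
    (h0 : 0 ≤ i) (hm : i < m) :
    (PySem.List.pyGet? (colTab M target j m) i).getD 0 = bestF M target j i.toNat := by
  unfold colTab
  rw [colTab_fold]
  have hi : i = (i.toNat : Int) := by omega
  conv_lhs => rw [hi, PySem.List.pyGet?_natCast]
  have hlt : i.toNat < m := by omega
  rw [List.getElem?_map]
  simp [List.getElem?_range, hlt]

-- walking once through a tail of chainGo with a negative pointer returns the accumulator
lemma chainGo_neg (l : List (List Int)) (i c : Int) (h : i < 0) : chainGo l i c = c := by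
  cases l with
  | nil => rfl
  | cons tab rest => unfold chainGo; rw [if_pos h]

-- both ports read the cell (i, j) as the same total default-0 lookup
lemma access_eq (M : List (List Int)) (i : Int) (j : ℕ) (hi0 : 0 ≤ i) :
    ((PySem.List.pyGet? ((PySem.List.pyGet? M i).getD []) (j : Int))).getD 0
      = (M.getD i.toNat []).getD j 0 := by
  rw [PySem.List.pyGet?_of_nonneg M hi0, PySem.List.pyGet?_natCast,
    ← List.getD_eq_getElem?_getD, ← List.getD_eq_getElem?_getD]

-- A's inner descent down column j from row i lands exactly on bestF (or falls off and stops)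
lemma descent (M : List (List Int)) (target : Int) (n : ℕ) (j : ℕ) (hj : j < n) :
    ∀ (iN : ℕ) (c : Int),
      countGo M target (n : Int) (iN : Int) (j : Int) c
        = (if bestF M target j iN < 0 then c
           else countGo M target (n : Int) (bestF M target j iN) ((j : Int) + 1)
                  (c + bestF M target j iN + 1)) := by
  intro iN
  induction iN with
  | zero =>
    intro c
    simp only [Nat.cast_zero]
    rw [countGo, dif_pos (by constructor <;> [omega; exact_mod_cast hj])]
    rw [access_eq M 0 j (by omega)]
    have ht0 : (0 : Int).toNat = 0 := rfl
    rw [ht0]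
    by_cases hle : (M.getD 0 []).getD j 0 ≤ target
    · rw [if_pos hle]
      have hb : bestF M target j 0 = 0 := by simp only [bestF]; rw [if_pos hle]
      rw [hb, if_neg (by omega)]
      norm_num
    · rw [if_neg hle]
      have hb : bestF M target j 0 = -1 := by simp only [bestF]; rw [if_neg hle]
      rw [hb, if_pos (by omega)]
      rw [countGo, dif_neg (by omega)]
  | succ iN ih =>
    intro c
    rw [countGo, dif_pos (by constructor <;> [omega; exact_mod_cast hj])]
    rw [access_eq M (iN + 1 : ℕ) j (by omega)]
    have htn : ((iN + 1 : ℕ) : Int).toNat = iN + 1 := by omega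
    rw [htn]
    by_cases hle : (M.getD (iN + 1) []).getD j 0 ≤ target
    · rw [if_pos hle]
      have hb : bestF M target j (iN + 1) = ((iN : Int) + 1) := by
        simp only [bestF]; rw [if_pos hle]
      rw [hb, if_neg (by omega)]
      congr 1 <;> push_cast <;> ring
    · rw [if_neg hle]
      have hb : bestF M target j (iN + 1) = bestF M target j iN := by
        simp only [bestF]; rw [if_neg hle]
      have hcast : ((iN + 1 : ℕ) : Int) - 1 = (iN : ℕ) := by push_cast; ring
      rw [hcast, hb]
      exact ih c
-- the descent preserves fuel: it only decreases i, so the outer induction below is on columns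

-- A's walk from (i, j) equals B's chain through the tables of the remaining columns j, j+1, …
lemma walk_eq_chain (M : List (List Int)) (target : Int) (n m : ℕ) (hm : m = M.length) :
    ∀ (k j : ℕ) (i c : Int), j + k = n → -1 ≤ i → i < m →
      countGo M target (n : Int) i (j : Int) c
        = chainGo ((List.range' j k).map (fun j' => colTab M target j' m)) i c := by
  intro k
  induction k with
  | zero =>
    intro j i c hjk hi1 him
    rw [countGo, dif_neg (by omega)]
    rfl
  | succ k ih =>
    intro j i c hjk hi1 him
    have hj : j < n := by omega
    rw [List.range'_succ, List.map_cons]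
    by_cases hneg : i < 0
    · rw [chainGo, if_pos hneg, countGo, dif_neg (by omega)]
    · have h0 : 0 ≤ i := by omega
      rw [chainGo, if_neg hneg]
      simp only []
      rw [colTab_get M target j m i h0 (by omega)]
      have hi : i = (i.toNat : Int) := by omega
      conv_lhs => rw [hi]
      rw [descent M target n j hj i.toNat c]
      set b := bestF M target j i.toNat with hbdef
      have hb1 : -1 ≤ b := bestF_ge M target j i.toNat
      have hbm : b < m := by
        have h1 := bestF_le M target j i.toNat
        omega
      by_cases hbneg : b < 0
      · rw [if_pos hbneg]
        rw [chainGo_neg _ _ _ hbneg]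
        omega
      · rw [if_neg hbneg]
        have hcast : ((j : Int) + 1) = ((j + 1 : ℕ) : Int) := by push_cast; ring
        rw [hcast, ih (j + 1) b (c + b + 1) (by omega) (by omega) (by exact_mod_cast hbm)]

-- ===== VERDICT (by name: the statement is the Claim_ definition above) =====
theorem count_spec : Claim_equal_count := by
  intro M target _hdom _hpre
  unfold Spec_count count count_alt
  have h := walk_eq_chain M target ((PySem.List.pyGet? M 0).getD []).length M.length rfl
    ((PySem.List.pyGet? M 0).getD []).length 0 ((M.length : Int) - 1) 0
    (by omega) (by omega) (by omega)
  rw [← List.range_eq_range'] at h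
  have hz : ((0 : ℕ) : Int) = 0 := rfl
  rw [hz] at h
  exact h
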